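-- pv_equiv track=rewrite | github.com/kaleoyster/nbi | nbi-utilities/nbi_data_chef.py | reorganize_segmented_data
-- ===== SOURCE A (Python) =====
-- from collections import defaultdict
--
-- def reorganize_segmented_data(grouped_records):
--     """
--     Description:
--         Returns a dictionary, that contains seperate
--     records for each identified segments.
--
--     Args:
--         grouped_records
--
--     returns:
--         updated_grouped_records
--     """
--     updated_grouped_records = defaultdict()
--     for record in grouped_records.items():
--         structure_no, val_dict = record
--         total_segments = len(val_dict['structureNumber'])
--         new_structure_numbers = []
--         for segment in range(0, total_segments):
--             new_structure_no = structure_no \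
--                             + '_' \
--                             + str(segment + 1)
--             updated_grouped_records[new_structure_no] = defaultdict()
--             new_structure_numbers.append(new_structure_no)
--
--         for col, values in val_dict.items():
--             val_length = len(values)
--             key_length = len(new_structure_numbers)
--             if val_length == key_length:
--                 for index in range(val_length):
--                     value = values[index]
--                     struct_no = new_structure_numbers[index]
--                     temp_dict = updated_grouped_records[struct_no]
--                     temp_dict[col] = value
--                     updated_grouped_records[struct_no] = temp_dict
--     return updated_grouped_records
-- ===== SOURCE B (Python) =====
-- from collections import defaultdict
--
-- def reorganize_segmented_data(grouped_records):
--     updated_grouped_records = defaultdict()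
--     for structure_no, val_dict in grouped_records.items():
--         total_segments = len(val_dict['structureNumber'])
--         # keep only the columns that carry one value per segment, once per record
--         columns = [(col, values) for col, values in val_dict.items()
--                    if len(values) == total_segments]
--         for segment in range(total_segments):
--             segment_dict = defaultdict()
--             for col, values in columns:
--                 segment_dict[col] = values[segment]
--             updated_grouped_records[structure_no + '_' + str(segment + 1)] = segment_dict
--     return updated_grouped_records
-- ===== Notes on version B (the rewrite author's own statement) =====
-- stated objective: simpler
-- what changed: B filters the equal-length columns once per record and then builds each per-segment dict completely in a single row-wise pass, instead of A's two phases of pre-creating empty segment dicts plus a parallel names list and then revisiting every partial segment dict column-by-column.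
import Mathlib
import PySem

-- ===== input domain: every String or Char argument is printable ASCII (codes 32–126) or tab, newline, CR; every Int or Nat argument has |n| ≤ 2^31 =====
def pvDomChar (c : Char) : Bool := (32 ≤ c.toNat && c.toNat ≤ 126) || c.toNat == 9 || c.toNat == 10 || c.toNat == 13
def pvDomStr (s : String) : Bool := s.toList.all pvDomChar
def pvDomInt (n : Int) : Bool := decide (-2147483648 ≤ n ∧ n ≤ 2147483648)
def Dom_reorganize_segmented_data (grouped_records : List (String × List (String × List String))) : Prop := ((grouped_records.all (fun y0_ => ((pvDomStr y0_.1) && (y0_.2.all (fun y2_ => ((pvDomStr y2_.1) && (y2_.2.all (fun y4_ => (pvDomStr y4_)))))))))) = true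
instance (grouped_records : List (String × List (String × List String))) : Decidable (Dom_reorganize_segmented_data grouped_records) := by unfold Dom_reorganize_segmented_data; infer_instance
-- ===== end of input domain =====

-- B restructures A's per-record work: it filters the equal-length columns once and builds each
-- per-segment dict completely in one row-wise pass, instead of A's pre-created empty segment dicts
-- plus a names list revisited column-by-column. Objective: simpler. Return values proved equal on Pre_.

-- ===== PORT A =====
-- Loop body of A's outer 'for record in grouped_records.items()' loop (extracted as a helper).
def pvStepA (updated : PySem.Dict String (PySem.Dict String String))
    (record : String × List (String × List String)) : PySem.Dict String (PySem.Dict String String) :=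
  let structure_no := record.1
  let val_dict : PySem.Dict String (List String) := PySem.Dict.mk record.2
  -- val_dict['structureNumber']: Pre_ guarantees the key is present, so `getD []` never defaults
  let total_segments := ((val_dict.get? "structureNumber").getD []).length
  let st := (PySem.List.pyRange 0 (total_segments : Int) 1).foldl
    (fun (st : PySem.Dict String (PySem.Dict String String) × List String) segment =>
      let new_structure_no := structure_no ++ "_" ++ PySem.Int.toStr (segment + 1)
      (st.1.insert new_structure_no PySem.Dict.empty, st.2 ++ [new_structure_no]))
    (updated, [])
  let new_structure_numbers := st.2
  val_dict.items.foldl (fun updated cv =>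
    let values := cv.2
    let val_length := values.length
    let key_length := new_structure_numbers.length
    if val_length = key_length then
      (PySem.List.pyRange 0 (val_length : Int) 1).foldl (fun updated index =>
        -- values[index] / new_structure_numbers[index]: index < val_length = key_length, in range
        let value := PySem.List.pyGetD values index ""
        let struct_no := PySem.List.pyGetD new_structure_numbers index ""
        -- updated_grouped_records[struct_no]: the key was inserted in the first loop, so present
        let temp_dict := updated.getD struct_no PySem.Dict.empty
        updated.insert struct_no (temp_dict.insert cv.1 value)) updated
    else updated) st.1

def reorganize_segmented_data (grouped_records : List (String × List (String × List String))) : List (String × List (String × String)) :=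
  ((grouped_records.foldl pvStepA PySem.Dict.empty).items).map (fun p => (p.1, p.2.items))

-- ===== PORT B =====
-- Loop body of B's outer loop (extracted as a helper).
def pvStepB (updated : PySem.Dict String (PySem.Dict String String))
    (record : String × List (String × List String)) : PySem.Dict String (PySem.Dict String String) :=
  let structure_no := record.1
  let val_dict : PySem.Dict String (List String) := PySem.Dict.mk record.2
  -- val_dict['structureNumber']: Pre_ guarantees the key is present, so `getD []` never defaults
  let total_segments := ((val_dict.get? "structureNumber").getD []).length
  let columns := val_dict.items.filter (fun cv => cv.2.length == total_segments)
  (PySem.List.pyRange 0 (total_segments : Int) 1).foldl (fun updated segment =>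
    let segment_dict := columns.foldl
      (fun (d : PySem.Dict String String) cv => d.insert cv.1 (PySem.List.pyGetD cv.2 segment ""))
      PySem.Dict.empty
    updated.insert (structure_no ++ "_" ++ PySem.Int.toStr (segment + 1)) segment_dict) updated

def reorganize_segmented_data_alt (grouped_records : List (String × List (String × List String))) : List (String × List (String × String)) :=
  ((grouped_records.foldl pvStepB PySem.Dict.empty).items).map (fun p => (p.1, p.2.items))

-- ===== PRECONDITION & SPEC =====
-- Pre_ excludes association lists with duplicate outer or inner keys (Python receives dicts, whose
-- construction collapses duplicates, so such lists do not represent the dict A actually processes)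
-- and records whose val_dict lacks the key 'structureNumber', on which A raises KeyError.
def Pre_reorganize_segmented_data (grouped_records : List (String × List (String × List String))) : Prop :=
  (grouped_records.map Prod.fst).Nodup ∧
  ∀ r ∈ grouped_records, (r.2.map Prod.fst).Nodup ∧ "structureNumber" ∈ r.2.map Prod.fst
instance (grouped_records : List (String × List (String × List String))) : Decidable (Pre_reorganize_segmented_data grouped_records) := by unfold Pre_reorganize_segmented_data; infer_instance

def pvWitness_reorganize_segmented_data : (List (String × List (String × List String))) :=
  [("A", [("structureNumber", ["s1", "s2"]), ("yearBuilt", ["1990", "1991"]), ("note", ["x"])])]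

def Spec_reorganize_segmented_data (grouped_records : List (String × List (String × List String))) (out : List (String × List (String × String))) : Prop := out = reorganize_segmented_data_alt grouped_records
instance (grouped_records : List (String × List (String × List String))) (out : List (String × List (String × String))) : Decidable (Spec_reorganize_segmented_data grouped_records out) := by unfold Spec_reorganize_segmented_data; infer_instance

-- ===== CLAIM (what is proved, stated in full; the proofs are below) =====
def Claim_equal_reorganize_segmented_data : Prop := ∀ (grouped_records : List (String × List (String × List String))), Dom_reorganize_segmented_data grouped_records → Pre_reorganize_segmented_data grouped_records → Spec_reorganize_segmented_data grouped_records (reorganize_segmented_data grouped_records)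

-- ===== LEMMAS AND PROOFS =====

-- insert at an already-present key commutes with insert at any other key.
theorem pvInsert_comm {κ ν : Type} [BEq κ] [LawfulBEq κ]
    (d : PySem.Dict κ ν) (k p1 : κ) (w v : ν) (h1 : k ≠ p1) (h2 : d.contains k = true) :
    (d.insert p1 v).insert k w = (d.insert k w).insert p1 v := by
  apply PySem.Dict.ext
  have hk1 : (d.insert p1 v).contains k = true := by
    rw [PySem.Dict.contains_insert]; simp [h2]
  by_cases hp : d.contains p1 = true
  · have hp2 : (d.insert k w).contains p1 = true := by
      rw [PySem.Dict.contains_insert]; simp [hp]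
    rw [PySem.Dict.items_insert_of_contains _ _ hk1,
        PySem.Dict.items_insert_of_contains _ _ hp,
        PySem.Dict.items_insert_of_contains _ _ hp2,
        PySem.Dict.items_insert_of_contains _ _ h2]
    simp only [List.map_map]
    apply List.map_congr_left
    intro p _
    by_cases e1 : p.1 = p1 <;> by_cases e2 : p.1 = k <;>
      simp [Function.comp, e1, e2, h1, Ne.symm h1, beq_iff_eq]
  · have hp' : d.contains p1 = false := by simpa using hp
    have hp2 : (d.insert k w).contains p1 = false := by
      rw [PySem.Dict.contains_insert]
      simp [hp', Ne.symm h1]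
    rw [PySem.Dict.items_insert_of_contains _ _ hk1,
        PySem.Dict.items_insert_of_not_contains _ _ hp',
        PySem.Dict.items_insert_of_not_contains _ _ hp2,
        PySem.Dict.items_insert_of_contains _ _ h2]
    simp [List.map_append, beq_iff_eq, Ne.symm h1]

theorem pvFoldIns_insert {κ ν : Type} [BEq κ] [LawfulBEq κ]
    (ps : List (κ × ν)) (d : PySem.Dict κ ν) (k : κ) (w : ν)
    (h : k ∉ ps.map Prod.fst) (h2 : d.contains k = true) :
    (ps.foldl (fun d p => d.insert p.1 p.2) d).insert k w
      = ps.foldl (fun d p => d.insert p.1 p.2) (d.insert k w) := by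
  induction ps generalizing d with
  | nil => rfl
  | cons p ps ih =>
    simp only [List.map_cons, List.mem_cons, not_or] at h
    simp only [List.foldl_cons]
    rw [ih _ h.2 (by rw [PySem.Dict.contains_insert]; simp [h2]),
        pvInsert_comm _ _ _ _ _ h.1 h2]

theorem pvFoldIns_getD_of_not_mem {κ ν : Type} [BEq κ] [LawfulBEq κ]
    (ps : List (κ × ν)) (d : PySem.Dict κ ν) (k : κ) (v0 : ν) (h : k ∉ ps.map Prod.fst) :
    (ps.foldl (fun d p => d.insert p.1 p.2) d).getD k v0 = d.getD k v0 := by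
  induction ps generalizing d with
  | nil => rfl
  | cons p ps ih =>
    simp only [List.map_cons, List.mem_cons, not_or] at h
    simp only [List.foldl_cons]
    rw [ih _ h.2, PySem.Dict.getD_insert_of_ne _ _ _ h.1]

-- One sweep of read-modify-write updates over pairwise-distinct keys, applied to the fold that
-- installed their current values, equals installing the updated values directly.
theorem pvModFold {κ ν μ : Type} [BEq κ] [LawfulBEq κ]
    (qs : List (κ × ν × μ)) (f : ν → μ → ν) (v0 : ν) :
    ∀ (u : PySem.Dict κ ν), (qs.map (fun q => q.1)).Nodup →
    qs.foldl (fun d q => d.insert q.1 (f (d.getD q.1 v0) q.2.2))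
        (qs.foldl (fun d q => d.insert q.1 q.2.1) u)
      = qs.foldl (fun d q => d.insert q.1 (f q.2.1 q.2.2)) u := by
  induction qs with
  | nil => intro u _; rfl
  | cons q qs ih =>
    intro u hnd
    simp only [List.map_cons, List.nodup_cons] at hnd
    simp only [List.foldl_cons]
    have hmem : q.1 ∉ (qs.map (fun p => (p.1, p.2.1))).map Prod.fst := by
      simpa using hnd.1
    have hfold : ∀ (d0 : PySem.Dict κ ν),
        qs.foldl (fun d q => d.insert q.1 q.2.1) d0
          = (qs.map (fun p => (p.1, p.2.1))).foldl (fun d p => d.insert p.1 p.2) d0 := by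
      intro d0; rw [List.foldl_map]
    have hget : (qs.foldl (fun d q => d.insert q.1 q.2.1) (u.insert q.1 q.2.1)).getD q.1 v0
        = q.2.1 := by
      rw [hfold, pvFoldIns_getD_of_not_mem _ _ _ _ hmem, PySem.Dict.getD_insert_self]
    rw [hget]
    have hins : (qs.foldl (fun d q => d.insert q.1 q.2.1) (u.insert q.1 q.2.1)).insert q.1
          (f q.2.1 q.2.2)
        = qs.foldl (fun d q => d.insert q.1 q.2.1) (u.insert q.1 (f q.2.1 q.2.2)) := by
      rw [hfold, hfold,
          pvFoldIns_insert _ _ _ _ hmem (PySem.Dict.contains_insert_self _ _ _),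
          PySem.Dict.insert_insert_self]
    rw [hins, ih _ hnd.2]

-- Loop interchange: A's column-major filling of the segment dicts equals the segment-major build.
theorem pvMain (n : Nat) (name : Nat → String) (hnd : ((List.range n).map name).Nodup) :
    ∀ (L : List (String × List String)) (ts : Nat → PySem.Dict String String)
      (u : PySem.Dict String (PySem.Dict String String)),
    (∀ cv ∈ L, cv.2.length = n) →
    L.foldl (fun d cv => (List.range n).foldl
        (fun d i => d.insert (name i) ((d.getD (name i) PySem.Dict.empty).insert cv.1 (cv.2.getD i ""))) d)
      ((List.range n).foldl (fun d i => d.insert (name i) (ts i)) u)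
    = (List.range n).foldl
        (fun d i => d.insert (name i) (L.foldl (fun t cv => t.insert cv.1 (cv.2.getD i "")) (ts i))) u := by
  intro L
  induction L with
  | nil => intro ts u _; rfl
  | cons cv L ih =>
    intro ts u hlen
    simp only [List.foldl_cons]
    have hstep : (List.range n).foldl
        (fun d i => d.insert (name i) ((d.getD (name i) PySem.Dict.empty).insert cv.1 (cv.2.getD i "")))
        ((List.range n).foldl (fun d i => d.insert (name i) (ts i)) u)
        = (List.range n).foldl
            (fun d i => d.insert (name i) ((ts i).insert cv.1 (cv.2.getD i ""))) u := by
      have e1 : ((List.range n).map (fun i => (name i, ts i, cv.2.getD i ""))).foldl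
            (fun d q => d.insert q.1 ((d.getD q.1 PySem.Dict.empty).insert cv.1 q.2.2))
            (((List.range n).map (fun i => (name i, ts i, cv.2.getD i ""))).foldl
              (fun d q => d.insert q.1 q.2.1) u)
          = (List.range n).foldl
              (fun d i => d.insert (name i) ((d.getD (name i) PySem.Dict.empty).insert cv.1 (cv.2.getD i "")))
              ((List.range n).foldl (fun d i => d.insert (name i) (ts i)) u) := by
        simp only [List.foldl_map]
      have e2 : ((List.range n).map (fun i => (name i, ts i, cv.2.getD i ""))).foldl
            (fun d q => d.insert q.1 (q.2.1.insert cv.1 q.2.2)) u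
          = (List.range n).foldl
              (fun d i => d.insert (name i) ((ts i).insert cv.1 (cv.2.getD i ""))) u := by
        simp only [List.foldl_map]
      rw [← e1, ← e2,
        pvModFold _ (fun t v => t.insert cv.1 v) PySem.Dict.empty _ (by simpa using hnd)]
    rw [hstep, ih (fun i => (ts i).insert cv.1 (cv.2.getD i ""))
      u (fun c hc => hlen c (List.mem_cons_of_mem _ hc))]

-- ----- str(n) is injective on the naturals (via a decimal-value round trip) -----

theorem pvToDigitsCore_append (fuel n : Nat) (acc : List Char) :
    Nat.toDigitsCore 10 fuel n acc = Nat.toDigitsCore 10 fuel n [] ++ acc := by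
  induction fuel generalizing n acc with
  | zero => rfl
  | succ f ih =>
    simp only [Nat.toDigitsCore]
    by_cases h : n / 10 = 0
    · simp [h]
    · simp only [h]
      rw [ih (n / 10) ((n % 10).digitChar :: acc), ih (n / 10) [(n % 10).digitChar]]
      simp

theorem pvToDigitsCore_fuel (f g n : Nat) (hf : n < f) (hg : n < g) :
    Nat.toDigitsCore 10 f n [] = Nat.toDigitsCore 10 g n [] := by
  induction f generalizing g n with
  | zero => omega
  | succ f ih =>
    cases g with
    | zero => omega
    | succ g =>
      simp only [Nat.toDigitsCore]
      by_cases h : n / 10 = 0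
      · simp [h]
      · simp only [h]
        rw [pvToDigitsCore_append f, pvToDigitsCore_append g,
            ih g (n / 10) (by omega) (by omega)]

theorem pvToDigits_rec (n : Nat) (h : 10 ≤ n) :
    Nat.toDigits 10 n = Nat.toDigits 10 (n / 10) ++ [(n % 10).digitChar] := by
  have h0 : n / 10 ≠ 0 := by omega
  show Nat.toDigitsCore 10 (n + 1) n [] = _
  simp only [Nat.toDigitsCore, if_neg h0]
  rw [pvToDigitsCore_append]
  rw [pvToDigitsCore_fuel n (n / 10 + 1) (n / 10) (by omega) (by omega)]
  rfl

theorem pvToDigits_base (n : Nat) (h : n < 10) : Nat.toDigits 10 n = [(n % 10).digitChar] := by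
  have h0 : n / 10 = 0 := by omega
  show Nat.toDigitsCore 10 (n + 1) n [] = _
  simp [Nat.toDigitsCore, h0]

theorem pvDigitChar_val (k : Nat) (h : k < 10) : (Nat.digitChar k).toNat - 48 = k := by
  interval_cases k <;> decide

theorem pvToDigits_val (n : Nat) :
    (Nat.toDigits 10 n).foldl (fun a c => 10 * a + (c.toNat - 48)) 0 = n := by
  induction n using Nat.strong_induction_on with
  | _ n ih =>
    by_cases h : n < 10
    · rw [pvToDigits_base n h]
      simp [pvDigitChar_val (n % 10) (by omega)]
      omega
    · rw [pvToDigits_rec n (by omega), List.foldl_append]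
      rw [ih (n / 10) (by omega)]
      simp [pvDigitChar_val (n % 10) (by omega)]
      omega

theorem pvToDigits_inj (a b : Nat) (h : Nat.toDigits 10 a = Nat.toDigits 10 b) : a = b := by
  have := pvToDigits_val a
  rw [h, pvToDigits_val b] at this
  omega

theorem pvName_inj (s : String) (i j : Nat)
    (h : s ++ "_" ++ PySem.Int.toStr ((i : Int) + 1) = s ++ "_" ++ PySem.Int.toStr ((j : Int) + 1)) :
    i = j := by
  have h2 : (s ++ "_" ++ PySem.Int.toStr ((i : Int) + 1)).toList
      = (s ++ "_" ++ PySem.Int.toStr ((j : Int) + 1)).toList := by rw [h]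
  simp only [String.toList_append, PySem.Int.toList_toStr] at h2
  have h3 : PySem.Int.toChars ((i : Int) + 1) = PySem.Int.toChars ((j : Int) + 1) :=
    List.append_cancel_left h2
  have hni : ¬ ((i : Int) + 1 < 0) := by omega
  have hnj : ¬ ((j : Int) + 1 < 0) := by omega
  simp only [PySem.Int.toChars, if_neg hni, if_neg hnj] at h3
  have h4 := pvToDigits_inj _ _ h3
  omega

-- The per-record loop bodies of A and B agree on every accumulator and record.
theorem pvStep_eq (u : PySem.Dict String (PySem.Dict String String))
    (rec : String × List (String × List String)) : pvStepA u rec = pvStepB u rec := by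
  obtain ⟨s, l⟩ := rec
  simp only [pvStepA, pvStepB, PySem.List.pyRange_zero_natCast, List.foldl_map]
  rw [PySem.List.foldl_prod_mk
    (f := fun (d : PySem.Dict String (PySem.Dict String String)) (i : Nat) =>
      d.insert (s ++ "_" ++ PySem.Int.toStr ((i : Int) + 1)) PySem.Dict.empty)
    (g := fun (acc : List String) (i : Nat) => acc ++ [s ++ "_" ++ PySem.Int.toStr ((i : Int) + 1)])]
  rw [PySem.List.foldl_append_singleton_eq_map]
  simp only [List.nil_append, PySem.List.pyGetD_natCast]
  set n := ((({ items := l } : PySem.Dict String (List String)).get? "structureNumber").getD []).length with hn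
  set nm : Nat → String := fun i => s ++ "_" ++ PySem.Int.toStr ((i : Int) + 1) with hnm
  set nms : List String := (List.range n).map nm with hnms
  have hnd : nms.Nodup := by
    rw [hnms]
    exact (List.nodup_range).map (fun i j h => pvName_inj s i j h)
  have hlen_nms : nms.length = n := by simp [hnms]
  simp only [hlen_nms]
  rw [PySem.List.foldl_ite_eq_foldl_filter (p := fun (cv : String × List String) => cv.2.length = n)]
  have hfilt : List.filter (fun (cv : String × List String) => decide (cv.2.length = n)) l
      = List.filter (fun cv => cv.2.length == n) l := by
    apply List.filter_congr
    intro x _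
    exact Eq.symm (Bool.beq_eq_decide_eq _ _)
  rw [hfilt]
  have hmemlen : ∀ cv ∈ List.filter (fun (cv : String × List String) => cv.2.length == n) l,
      cv.2.length = n := by
    intro cv hcv
    have := (List.mem_filter.mp hcv).2
    simpa using this
  rw [PySem.List.foldl_congr_mem _ _
    (fun d cv => (List.range n).foldl
      (fun d i => d.insert (nm i) ((d.getD (nm i) PySem.Dict.empty).insert cv.1 (cv.2.getD i ""))) d)
    _
    (by
      intro acc cv hcv
      rw [hmemlen cv hcv]
      apply PySem.List.foldl_congr_mem
      intro d i hi
      have hilt : i < n := List.mem_range.mp hi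
      rw [hnms, PySem.List.getD_map_range _ _ _ _ hilt])]
  simp only [show ∀ i : Nat, s ++ "_" ++ PySem.Int.toStr ((i : Int) + 1) = nm i from fun i => rfl]
  rw [pvMain n nm hnd (List.filter (fun cv => cv.2.length == n) l) (fun _ => PySem.Dict.empty) u hmemlen]

-- ===== VERDICT (by name: the statement is the Claim_ definition above) =====
theorem reorganize_segmented_data_spec : Claim_equal_reorganize_segmented_data := by
  intro gr _ _
  unfold Spec_reorganize_segmented_data reorganize_segmented_data reorganize_segmented_data_alt
  rw [show pvStepA = pvStepB from funext fun u => funext fun r => pvStep_eq u r]
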